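-- pv_equiv track=rewrite | github.com/necst/cicero | scripts/sim/vcd_analyzer.py | remove_non_maximal_scopes
-- ===== SOURCE A (Python) =====
-- def remove_non_maximal_scopes(scopes):
-- 	i=0
-- 	j=0
-- 	while i +1 < len(scopes):
-- 		e = scopes[i]
-- 		j = i+1
-- 		while(j< len(scopes)):
-- 			if scopes[j].find(e) >= 0:
-- 				del scopes[j]
-- 			else:
-- 				j+=1
-- 		i+=1
-- 	return scopes
-- ===== SOURCE B (Python) =====
-- def remove_non_maximal_scopes(scopes):
-- 	kept = []
-- 	for x in scopes:
-- 		if not any(e in x for e in kept):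
-- 			kept.append(x)
-- 	scopes[:] = kept
-- 	return scopes
-- ===== Notes on version B (the rewrite author's own statement) =====
-- stated objective: simpler
-- what changed: Replaces A's index-juggling nested while loops with in-place deletion by a single forward accumulate-if-not-covered pass building a fresh kept list (written back via slice assignment to preserve the in-place mutation).
import Mathlib
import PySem

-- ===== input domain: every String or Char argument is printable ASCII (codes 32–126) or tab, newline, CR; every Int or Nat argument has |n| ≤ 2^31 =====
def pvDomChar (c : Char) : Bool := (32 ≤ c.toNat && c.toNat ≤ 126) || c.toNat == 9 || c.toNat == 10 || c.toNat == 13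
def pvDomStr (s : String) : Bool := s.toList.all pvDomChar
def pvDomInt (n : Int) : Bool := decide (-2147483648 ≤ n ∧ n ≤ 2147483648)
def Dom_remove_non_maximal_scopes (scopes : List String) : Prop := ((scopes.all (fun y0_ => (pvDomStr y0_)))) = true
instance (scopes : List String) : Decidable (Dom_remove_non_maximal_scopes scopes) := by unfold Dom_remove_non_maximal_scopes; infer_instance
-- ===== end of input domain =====

-- B replaces A's nested in-place-deletion while loops with one forward accumulate-if-not-covered
-- pass (objective: simpler). Both Pythons mutate the argument list in place identically; the
-- equivalence proved here is about the return value.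


-- ===== PORT A =====
-- inner while loop: while j < len(scopes): if scopes[j].find(e) >= 0: del scopes[j] else: j += 1
-- (fuel-based structural recursion; each iteration either shortens the list or advances j, so
--  fuel = len(scopes) never runs out — proved in pvInnerA_spec below)
def pvInnerA : Nat → String → List String → Nat → List String
  | 0, _, scopes, _ => scopes
  | fuel + 1, e, scopes, j =>
    if h : j < scopes.length then
      if 0 ≤ PySem.Str.find scopes[j] e then
        pvInnerA fuel e (scopes.eraseIdx j) j
      else
        pvInnerA fuel e scopes (j + 1)
    else scopes

-- outer while loop: while i + 1 < len(scopes): e = scopes[i]; <inner from j = i+1>; i += 1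
def pvOuterA : Nat → List String → Nat → List String
  | 0, scopes, _ => scopes
  | fuel + 1, scopes, i =>
    if h : i + 1 < scopes.length then
      pvOuterA fuel (pvInnerA scopes.length (scopes[i]'(by omega)) scopes (i + 1)) (i + 1)
    else scopes

def remove_non_maximal_scopes (scopes : List String) : List String :=
  pvOuterA scopes.length scopes 0

-- ===== PORT B =====
-- kept = []; for x in scopes: if not any(e in x for e in kept): kept.append(x); return kept
def remove_non_maximal_scopes_alt (scopes : List String) : List String :=
  scopes.foldl
    (fun kept x => if kept.any (fun e => PySem.Str.isIn e x) then kept else kept ++ [x]) []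

-- ===== PRECONDITION & SPEC =====
def Spec_remove_non_maximal_scopes (scopes : List String) (out : List String) : Prop := out = remove_non_maximal_scopes_alt scopes
instance (scopes : List String) (out : List String) : Decidable (Spec_remove_non_maximal_scopes scopes out) := by unfold Spec_remove_non_maximal_scopes; infer_instance

-- ===== CLAIM (what is proved, stated in full; the proofs are below) =====
def Claim_equal_remove_non_maximal_scopes : Prop := ∀ (scopes : List String), Dom_remove_non_maximal_scopes scopes → Spec_remove_non_maximal_scopes scopes (remove_non_maximal_scopes scopes)

-- ===== LEMMAS AND PROOFS =====

-- A's substring test "x.find(e) >= 0" agrees with B's "e in x"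
theorem pvCov_iff (e x : String) : 0 ≤ PySem.Str.find x e ↔ PySem.Str.isIn e x = true := by
  rw [PySem.Str.find_nonneg_iff, PySem.Str.isIn_iff_infix]

-- B's loop step
def pvStepB (kept : List String) (x : String) : List String :=
  if kept.any (fun e => PySem.Str.isIn e x) then kept else kept ++ [x]

theorem alt_eq_foldl (scopes : List String) :
    remove_non_maximal_scopes_alt scopes = scopes.foldl pvStepB [] := rfl

theorem pvStepB_covered {K : List String} {x : String}
    (h : (K.any fun e => PySem.Str.isIn e x) = true) : pvStepB K x = K := by
  unfold pvStepB; rw [h]; rfl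

theorem pvStepB_free {K : List String} {x : String}
    (h : (K.any fun e => PySem.Str.isIn e x) = false) : pvStepB K x = K ++ [x] := by
  unfold pvStepB; rw [h]; rfl

theorem pvAny_false {K : List String} {x : String}
    (h : ∀ e ∈ K, PySem.Str.isIn e x = false) :
    (K.any fun e => PySem.Str.isIn e x) = false := by
  simp only [List.any_eq_false]
  intro e he
  rw [h e he]
  exact Bool.false_ne_true

theorem pvFilter_cons_pos {e x : String} (l : List String) (h : PySem.Str.isIn e x = false) :
    (x :: l).filter (fun z => !PySem.Str.isIn e z) = x :: l.filter (fun z => !PySem.Str.isIn e z) := by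
  rw [List.filter_cons, h]
  rfl

theorem pvFilter_cons_neg {e x : String} (l : List String) (h : PySem.Str.isIn e x = true) :
    (x :: l).filter (fun z => !PySem.Str.isIn e z) = l.filter (fun z => !PySem.Str.isIn e z) := by
  rw [List.filter_cons, h]
  rfl

-- the inner loop starting right after a prefix just filters the tail by "contains e"
theorem pvInnerA_spec (e : String) (rest : List String) :
    ∀ (pre : List String) (fuel : Nat), rest.length ≤ fuel →
      pvInnerA fuel e (pre ++ rest) pre.length
        = pre ++ rest.filter (fun z => !PySem.Str.isIn e z) := by
  induction rest with
  | nil =>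
    intro pre fuel _
    match fuel with
    | 0 => simp [pvInnerA]
    | f + 1 => simp [pvInnerA]
  | cons x rest ih =>
    intro pre fuel hf
    match fuel with
    | f + 1 =>
      have hf' : rest.length ≤ f := by simp at hf; omega
      simp only [pvInnerA]
      have hlt : pre.length < (pre ++ x :: rest).length := by simp
      have hget : (pre ++ x :: rest)[pre.length]'hlt = x := by
        simp [List.getElem_append_right (Nat.le_refl pre.length)]
      rw [dif_pos hlt, hget]
      by_cases hc : PySem.Str.isIn e x = true
      · rw [if_pos ((pvCov_iff e x).mpr hc)]
        have herase : (pre ++ x :: rest).eraseIdx pre.length = pre ++ rest := by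
          rw [List.eraseIdx_append_of_length_le (Nat.le_refl pre.length)]
          simp
        rw [herase, ih pre f hf', pvFilter_cons_neg rest hc]
      · rw [if_neg (fun h => hc ((pvCov_iff e x).mp h))]
        have hc' : PySem.Str.isIn e x = false := eq_false_of_ne_true hc
        have hsp : pre ++ x :: rest = (pre ++ [x]) ++ rest := by simp
        rw [hsp]
        have hlen : pre.length + 1 = (pre ++ [x]).length := by simp
        rw [hlen, ih (pre ++ [x]) f hf', pvFilter_cons_pos rest hc']
        simp

-- B's fold silently skips elements covered by an element already kept
theorem foldl_skip_covered (e : String) (l : List String) :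
    ∀ K : List String, e ∈ K →
      List.foldl pvStepB K l = List.foldl pvStepB K (l.filter (fun z => !PySem.Str.isIn e z)) := by
  induction l with
  | nil => intro K _; rfl
  | cons x t ih =>
    intro K hK
    by_cases hc : PySem.Str.isIn e x = true
    · rw [pvFilter_cons_neg t hc, List.foldl_cons,
        pvStepB_covered (List.any_eq_true.mpr ⟨e, hK, hc⟩)]
      exact ih K hK
    · rw [pvFilter_cons_pos t (eq_false_of_ne_true hc), List.foldl_cons, List.foldl_cons]
      apply ih
      unfold pvStepB
      split
      · exact hK
      · exact List.mem_append_left _ hK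

-- main invariant: once no kept element covers any pending element, A's outer loop and B's fold agree
theorem pvMain (fuel : Nat) : ∀ (rest kept : List String), rest.length ≤ fuel + 1 →
    (∀ x ∈ rest, ∀ e ∈ kept, PySem.Str.isIn e x = false) →
    pvOuterA fuel (kept ++ rest) kept.length = List.foldl pvStepB kept rest := by
  induction fuel with
  | zero =>
    intro rest kept hlen hinv
    match rest with
    | [] => simp [pvOuterA]
    | [x] =>
      show kept ++ [x] = _
      rw [List.foldl_cons, pvStepB_free (pvAny_false (hinv x (by simp))), List.foldl_nil]
  | succ f ih =>
    intro rest kept hlen hinv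
    match rest with
    | [] => simp [pvOuterA]
    | [x] =>
      simp only [pvOuterA]
      have hc : ¬ (kept.length + 1 < (kept ++ [x]).length) := by simp
      rw [dif_neg hc, List.foldl_cons, pvStepB_free (pvAny_false (hinv x (by simp))),
        List.foldl_nil]
    | x :: y :: t =>
      have hltA : kept.length + 1 < (kept ++ x :: y :: t).length := by simp
      simp only [pvOuterA]
      rw [dif_pos hltA]
      have hget : (kept ++ x :: y :: t)[kept.length]'(by omega) = x := by
        simp [List.getElem_append_right (Nat.le_refl kept.length)]
      rw [hget]
      have hsplit : kept ++ x :: y :: t = (kept ++ [x]) ++ (y :: t) := by simp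
      have hlen1 : kept.length + 1 = (kept ++ [x]).length := by simp
      have hfuel : (y :: t).length ≤ (kept ++ x :: y :: t).length := by simp; omega
      rw [hsplit, hlen1, pvInnerA_spec x (y :: t) (kept ++ [x]) _ (by rw [← hsplit]; exact hfuel)]
      set rest' := (y :: t).filter (fun z => !PySem.Str.isIn x z) with hrest'
      have hinv' : ∀ z ∈ rest', ∀ e ∈ kept ++ [x], PySem.Str.isIn e z = false := by
        intro z hz e he
        have hz' := List.mem_filter.mp hz
        rcases List.mem_append.mp he with h | h
        · exact hinv z (List.mem_cons_of_mem x hz'.1) e h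
        · have : e = x := List.mem_singleton.mp h
          subst this
          have := hz'.2
          cases hb : PySem.Str.isIn e z
          · rfl
          · rw [hb] at this; simp at this
      have hlen' : rest'.length ≤ f + 1 := by
        have h1 : rest'.length ≤ (y :: t).length := List.length_filter_le _ _
        simp at h1 hlen
        omega
      rw [ih rest' (kept ++ [x]) hlen' hinv',
        List.foldl_cons, pvStepB_free (pvAny_false (hinv x (by simp))),
        foldl_skip_covered x (y :: t) (kept ++ [x]) (by simp)]

-- ===== VERDICT (by name: the statement is the Claim_ definition above) =====
theorem remove_non_maximal_scopes_spec : Claim_equal_remove_non_maximal_scopes := by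
  intro scopes _
  unfold Spec_remove_non_maximal_scopes
  rw [alt_eq_foldl]
  have := pvMain scopes.length scopes [] (Nat.le_succ _) (by intro x _ e he; cases he)
  simpa [remove_non_maximal_scopes] using this
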